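-- pv_equiv track=rewrite | github.com/Johanypf/Python | Practice/Practice/reto10.py | producto_mas_costoso
-- ===== SOURCE A (Python) =====
-- def producto_mas_costoso(carrito_compras:dict)->str:
--
--     if not carrito_compras:
--         return ("No hay productos en el carrito")
--
--     expensive = max(carrito_compras.values())
--     lista_productos = []
--     for i,y in carrito_compras.items():
--         if y == expensive:
--             lista_productos.append(i)
--
--
--     new_list = sorted(lista_productos)
--
--     return new_list[0]
-- ===== SOURCE B (Python) =====
-- def producto_mas_costoso(carrito_compras: dict) -> str:
--     if not carrito_compras:
--         return ("No hay productos en el carrito")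
--
--     items = iter(carrito_compras.items())
--     best_key, best_price = next(items)
--     for key, price in items:
--         if price > best_price or (price == best_price and key < best_key):
--             best_key, best_price = key, price
--     return best_key
-- ===== Notes on version B (the rewrite author's own statement) =====
-- stated objective: simpler
-- what changed: Replaces the three-stage max-then-filter-then-sort with a single pass that tracks the best (highest-price, lexicographically-smallest-key) item.
import Mathlib
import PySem

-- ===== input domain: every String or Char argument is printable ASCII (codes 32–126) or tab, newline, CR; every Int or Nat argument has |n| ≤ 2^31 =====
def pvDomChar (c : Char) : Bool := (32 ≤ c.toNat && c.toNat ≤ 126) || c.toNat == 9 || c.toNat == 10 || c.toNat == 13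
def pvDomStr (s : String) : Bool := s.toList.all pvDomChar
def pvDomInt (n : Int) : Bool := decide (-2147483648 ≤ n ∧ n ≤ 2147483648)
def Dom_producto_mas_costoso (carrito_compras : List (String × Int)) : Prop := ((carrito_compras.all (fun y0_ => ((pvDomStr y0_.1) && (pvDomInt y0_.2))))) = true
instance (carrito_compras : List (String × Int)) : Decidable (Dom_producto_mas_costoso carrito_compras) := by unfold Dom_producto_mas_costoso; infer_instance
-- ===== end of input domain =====

-- B replaces A's max-then-filter-then-sort pipeline by a single pass tracking the
-- best (highest price, lexicographically smallest key on ties) item: simpler, one traversal.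

-- ===== PORT A =====
def producto_mas_costoso (carrito_compras : List (String × Int)) : String :=
  if carrito_compras = [] then "No hay productos en el carrito"
  else
    let expensive := (PySem.List.max? (carrito_compras.map Prod.snd) (fun y => y)).getD 0
    let lista_productos := carrito_compras.foldl
      (fun acc p => if p.2 = expensive then acc ++ [p.1] else acc) []
    let new_list := PySem.List.sorted lista_productos (fun x => x) false
    PySem.List.pyGetD new_list 0 ""   -- new_list[0]; never empty here, so the default is unreachable

-- ===== PORT B =====
-- one update step of B's loop: take p if it is strictly pricier, or same price and smaller key
def pvStep (best p : String × Int) : String × Int :=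
  if p.2 > best.2 ∨ (p.2 = best.2 ∧ PySem.Chars.strLt p.1.toList best.1.toList = true) then p else best

def producto_mas_costoso_alt (carrito_compras : List (String × Int)) : String :=
  match carrito_compras with
  | [] => "No hay productos en el carrito"
  | first :: rest => (rest.foldl pvStep first).1

-- ===== PRECONDITION & SPEC =====
def Spec_producto_mas_costoso (carrito_compras : List (String × Int)) (out : String) : Prop := out = producto_mas_costoso_alt carrito_compras
instance (carrito_compras : List (String × Int)) (out : String) : Decidable (Spec_producto_mas_costoso carrito_compras out) := by unfold Spec_producto_mas_costoso; infer_instance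

-- ===== CLAIM (what is proved, stated in full; the proofs are below) =====
def Claim_equal_producto_mas_costoso : Prop := ∀ (carrito_compras : List (String × Int)), Dom_producto_mas_costoso carrito_compras → Spec_producto_mas_costoso carrito_compras (producto_mas_costoso carrito_compras)

-- ===== LEMMAS AND PROOFS =====

-- the stored Bool comparison is Python's / Lean's '<' on String
lemma pvStrLt_iff (a b : String) : PySem.Chars.strLt a.toList b.toList = true ↔ a < b := by
  simp [PySem.Chars.strLt, String.lt_iff_toList_lt]

-- B's fold returns a member of the list whose price is maximal and, among the
-- maximal-price members, whose key is minimal.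
lemma pvStep_foldl_spec (l : List (String × Int)) (b : String × Int) :
    (l.foldl pvStep b) ∈ b :: l ∧
    (∀ p ∈ b :: l, p.2 ≤ (l.foldl pvStep b).2) ∧
    (∀ p ∈ b :: l, p.2 = (l.foldl pvStep b).2 → (l.foldl pvStep b).1 ≤ p.1) := by
  induction l generalizing b with
  | nil =>
    refine ⟨by simp, ?_, ?_⟩ <;> intro p hp <;> simp_all
  | cons x t ih =>
    obtain ⟨hmem, hub, htie⟩ := ih (pvStep b x)
    simp only [List.foldl_cons]
    by_cases hc : x.2 > b.2 ∨ (x.2 = b.2 ∧ PySem.Chars.strLt x.1.toList b.1.toList = true)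
    · have hs : pvStep b x = x := by unfold pvStep; rw [if_pos hc]
      rw [hs] at hmem hub htie ⊢
      have hx2 : x.2 ≤ (t.foldl pvStep x).2 := hub x (List.mem_cons_self ..)
      have hb2x : b.2 ≤ x.2 := by rcases hc with h | ⟨h, _⟩ <;> omega
      refine ⟨?_, ?_, ?_⟩
      · rcases List.mem_cons.mp hmem with h | h
        · rw [h]; simp
        · simp [h]
      · intro p hp
        rcases List.mem_cons.mp hp with h | hp'
        · rw [h]; omega
        · exact hub p hp'
      · intro p hp hpe
        rcases List.mem_cons.mp hp with h | hp'
        · rw [h] at hpe ⊢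
          -- b ties the max: then x.2 = b.2, so the taken branch forced x.1 < b.1
          have hxe : x.2 = (t.foldl pvStep x).2 := by omega
          have hxlt : x.1 < b.1 := by
            rcases hc with h' | ⟨_, h'⟩
            · exact absurd h' (by omega)
            · exact (pvStrLt_iff x.1 b.1).mp h'
          exact le_trans (htie x (List.mem_cons_self ..) hxe) (le_of_lt hxlt)
        · exact htie p hp' hpe
    · have hs : pvStep b x = b := by unfold pvStep; rw [if_neg hc]
      rw [hs] at hmem hub htie ⊢
      have hc1 : ¬ x.2 > b.2 := fun h => hc (Or.inl h)
      have hc2 : x.2 = b.2 → b.1 ≤ x.1 := by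
        intro he
        by_contra hlt
        exact hc (Or.inr ⟨he, (pvStrLt_iff x.1 b.1).mpr (lt_of_not_ge hlt)⟩)
      have hb2 : b.2 ≤ (t.foldl pvStep b).2 := hub b (List.mem_cons_self ..)
      refine ⟨?_, ?_, ?_⟩
      · rcases List.mem_cons.mp hmem with h | h
        · rw [h]; simp
        · simp [h]
      · intro p hp
        rcases List.mem_cons.mp hp with h | hp'
        · rw [h]; omega
        · rcases List.mem_cons.mp hp' with h | hp''
          · rw [h]; omega
          · exact hub p (List.mem_cons_of_mem _ hp'')
      · intro p hp hpe
        rcases List.mem_cons.mp hp with h | hp'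
        · rw [h] at hpe ⊢
          exact htie b (List.mem_cons_self ..) hpe
        · rcases List.mem_cons.mp hp' with h | hp''
          · rw [h] at hpe ⊢
            -- x ties the max: then x.2 = b.2, and the skipped branch gives b.1 ≤ x.1
            have hxb : x.2 = b.2 := by omega
            exact le_trans (htie b (List.mem_cons_self ..) (by omega)) (hc2 hxb)
          · exact htie p (List.mem_cons_of_mem _ hp'') hpe

-- A's append-if loop is filter-then-map of the keys
lemma pvFoldl_filter_keys (e : Int) (l : List (String × Int)) (acc : List String) :
    l.foldl (fun acc p => if p.2 = e then acc ++ [p.1] else acc) acc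
      = acc ++ (l.filter (fun p => p.2 = e)).map Prod.fst := by
  induction l generalizing acc with
  | nil => simp
  | cons x t ih => by_cases h : x.2 = e <;> simp [h, ih]

-- ===== VERDICT (by name: the statement is the Claim_ definition above) =====
theorem producto_mas_costoso_spec : Claim_equal_producto_mas_costoso := by
  intro c _
  unfold Spec_producto_mas_costoso
  match c with
  | [] => rfl
  | (k, v) :: rest =>
    show producto_mas_costoso ((k, v) :: rest) = (rest.foldl pvStep (k, v)).1
    set r := rest.foldl pvStep (k, v) with hr
    obtain ⟨hmem, hub, htie⟩ := pvStep_foldl_spec rest (k, v)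
    rw [← hr] at hmem hub htie
    -- A's expensive equals r.2
    have hmax : PySem.List.max? (((k, v) :: rest).map Prod.snd) (fun y => y)
        = some ((rest.map Prod.snd).foldl max v) := by
      simpa using PySem.List.max?_id_cons v (rest.map Prod.snd)
    have hle := PySem.List.le_foldl_max (rest.map Prod.snd) v
    have hEmem := PySem.List.foldl_max_mem (rest.map Prod.snd) v
    set E := (rest.map Prod.snd).foldl max v with hE
    have hEr : E = r.2 := by
      have h1 : E ≤ r.2 := by
        rcases hEmem with h | h
        · have hkv : v ≤ r.2 := hub (k, v) (List.mem_cons_self ..)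
          omega
        · obtain ⟨p, hp, hpE⟩ := List.mem_map.mp h
          have := hub p (List.mem_cons_of_mem _ hp)
          omega
      have h2 : r.2 ≤ E := by
        rcases List.mem_cons.mp hmem with h | h
        · have : r.2 = v := by rw [h]
          omega
        · exact hle.2 r.2 (List.mem_map.mpr ⟨r, h, rfl⟩)
      omega
    -- evaluate A
    unfold producto_mas_costoso
    rw [if_neg (by simp)]
    simp only [hmax, Option.getD_some]
    rw [pvFoldl_filter_keys, List.nil_append]
    set lista := (((k, v) :: rest).filter (fun p => p.2 = E)).map Prod.fst with hl
    have hr1 : r.1 ∈ lista :=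
      List.mem_map.mpr ⟨r, List.mem_filter.mpr ⟨hmem, by simp [hEr]⟩, rfl⟩
    have hne : PySem.List.sorted lista (fun x => x) false ≠ [] := by
      intro h0
      rw [PySem.List.sorted_eq_nil_iff] at h0
      rw [h0] at hr1
      simp at hr1
    obtain ⟨m, t, hmt⟩ := List.exists_cons_of_ne_nil hne
    rw [hmt, PySem.List.pyGetD_zero_cons]
    -- both sides are the least key among the max-priced items
    have hmmem : m ∈ lista :=
      (PySem.List.mem_sorted lista (fun x => x) false m).mp
        (by rw [hmt]; exact List.mem_cons_self ..)
    have hmle : m ≤ r.1 := PySem.List.key_head_sorted_le lista (fun x => x) hmt r.1 hr1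
    have hrle : r.1 ≤ m := by
      obtain ⟨p, hp, hpm⟩ := List.mem_map.mp hmmem
      obtain ⟨hpc, hpE⟩ := List.mem_filter.mp hp
      simp only [decide_eq_true_eq] at hpE
      rw [← hpm]
      exact htie p hpc (by omega)
    exact le_antisymm hmle hrle
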